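-- pv_equiv track=rewrite | github.com/pypi-data/pypi-mirror-402 | packages/kevin-toolbox/kevin_toolbox-1.4.14-py3-none-any.whl/kevin_toolbox/math/dimension/coordinates/generate/normal_indices_generator.py | normal_indices_generator
-- ===== SOURCE A (Python) =====
-- def _recursive(indices, axis_beg, axis_end, step, shape):
--     if axis_beg == axis_end:  # 到达最后一维
--         for i in range(shape[axis_beg]):
--             indices[axis_beg] = i
--             yield indices
--     else:
--         for i in range(shape[axis_beg]):
--             indices[axis_beg] = i
--             yield from _recursive(indices, axis_beg + step, axis_end, step, shape)
--
-- def normal_indices_generator(shape, order="C"):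
--     """
--         迭代生成遍历 shape 所需要的所有的坐标 indices
--             indices 格式的具体定义参见 coordinates.convert()
--
--         参数：
--             shape:          <list/tuple> 要遍历的形状
--             order:          <str> 遍历的模式
--                                 两种取值：
--                                     "C":    row first，从前往后，首先遍历第一个维度
--                                     "F":    column first，从后往前，首先遍历最后一个维度
--     """
--     assert isinstance(shape, (list, tuple,)) and len(shape) > 0
--     assert order in ["C", "F"]
--
--     if order == "C":
--         axis_beg, axis_end = 0, len(shape) - 1
--         step = 1
--     else:
--         axis_end, axis_beg = 0, len(shape) - 1
--         step = -1
--
--     for indices in _recursive(indices=[0] * len(shape), axis_beg=axis_beg, axis_end=axis_end, step=step, shape=shape):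
--         yield indices[:]
-- ===== SOURCE B (Python) =====
-- def normal_indices_generator(shape, order="C"):
--     assert isinstance(shape, (list, tuple,)) and len(shape) > 0
--     assert order in ["C", "F"]
--     # build the full table by a fold from the fastest-varying axis outwards
--     sh = list(shape) if order == "C" else list(reversed(shape))
--     out = [[]]
--     for n in reversed(sh):
--         out = [[i] + t for i in range(n) for t in out]
--     for t in out:
--         yield t if order == "C" else list(reversed(t))
-- ===== Notes on version B (the rewrite author's own statement) =====
-- stated objective: idiomatic
-- what changed: Replaces the nested recursive generator that mutates a shared index buffer with a single iterative fold that builds the whole index table back-to-front (fastest-varying axis first), handling F order by reversing the shape and each emitted tuple; no recursion and no mutable buffer.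
import Mathlib
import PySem

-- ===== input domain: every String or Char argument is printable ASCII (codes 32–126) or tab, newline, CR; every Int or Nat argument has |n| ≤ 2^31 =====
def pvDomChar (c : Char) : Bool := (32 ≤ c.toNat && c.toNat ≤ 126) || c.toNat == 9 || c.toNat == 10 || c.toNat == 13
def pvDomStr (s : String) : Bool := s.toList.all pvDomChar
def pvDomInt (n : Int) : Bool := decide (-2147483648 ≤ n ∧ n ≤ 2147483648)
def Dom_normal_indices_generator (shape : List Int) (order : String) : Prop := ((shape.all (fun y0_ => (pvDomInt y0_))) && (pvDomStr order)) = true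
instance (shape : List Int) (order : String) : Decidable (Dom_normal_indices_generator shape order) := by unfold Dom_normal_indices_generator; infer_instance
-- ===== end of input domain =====

-- B replaces A's recursive generator over a mutable index buffer by an iterative fold
-- building the index table back-to-front (idiomatic, no recursion); return values only
-- (both are generators; equivalence is about the yielded sequence).


-- ===== PORT A =====
-- indices[b] = i  — exact here: every index A writes is a nonnegative in-range axis number
def pySetAt (xs : List Int) (k : Int) (v : Int) : List Int := xs.set k.toNat v

-- _recursive; fuel = recursion depth (a totality guard only: A is always called with
-- enough fuel to reach axis_end)
def pyRecursive : Nat → List Int → Int → Int → Int → List Int → List Int × List (List Int)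
  | 0, indices, _, _, _, _ => (indices, [])
  | fuel + 1, indices, b, e, s, shape =>
    if b = e then
      (PySem.List.pyRange 0 ((PySem.List.pyGet? shape b).getD 0) 1).foldl
        (fun st i =>
          let ind := pySetAt st.1 b i
          (ind, st.2 ++ [ind])) (indices, [])
    else
      (PySem.List.pyRange 0 ((PySem.List.pyGet? shape b).getD 0) 1).foldl
        (fun st i =>
          let ind := pySetAt st.1 b i
          let r := pyRecursive fuel ind (b + s) e s shape
          (r.1, st.2 ++ r.2)) (indices, [])

def normal_indices_generator (shape : List Int) (order : String) : List (List Int) :=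
  if shape.length > 0 ∧ (order = "C" ∨ order = "F") then
    if order = "C" then
      (pyRecursive shape.length (List.replicate shape.length 0) 0 ((shape.length : Int) - 1) 1 shape).2
    else
      (pyRecursive shape.length (List.replicate shape.length 0) ((shape.length : Int) - 1) 0 (-1) shape).2
  else []  -- AssertionError in A; excluded by Pre_

-- ===== PORT B =====
def normal_indices_generator_alt (shape : List Int) (order : String) : List (List Int) :=
  if shape.length > 0 ∧ (order = "C" ∨ order = "F") then
    let sh := if order = "C" then shape else shape.reverse
    let out := sh.reverse.foldl
      (fun out n => (PySem.List.pyRange 0 n 1).flatMap (fun i => out.map (fun t => i :: t)))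
      [[]]
    out.map (fun t => if order = "C" then t else t.reverse)
  else []  -- AssertionError in B; excluded by Pre_

-- ===== PRECONDITION & SPEC =====
-- Pre_ excludes exactly the inputs on which A's asserts raise AssertionError:
-- an empty shape or an order other than "C"/"F".
def Pre_normal_indices_generator (shape : List Int) (order : String) : Prop :=
  shape.length > 0 ∧ (order = "C" ∨ order = "F")
instance (shape : List Int) (order : String) : Decidable (Pre_normal_indices_generator shape order) := by unfold Pre_normal_indices_generator; infer_instance
def pvWitness_normal_indices_generator : List Int × String := ([2, 3], "C")

def Spec_normal_indices_generator (shape : List Int) (order : String) (out : List (List Int)) : Prop := out = normal_indices_generator_alt shape order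
instance (shape : List Int) (order : String) (out : List (List Int)) : Decidable (Spec_normal_indices_generator shape order out) := by unfold Spec_normal_indices_generator; infer_instance

-- ===== CLAIM (what is proved, stated in full; the proofs are below) =====
def Claim_equal_normal_indices_generator : Prop := ∀ (shape : List Int) (order : String), Dom_normal_indices_generator shape order → Pre_normal_indices_generator shape order → Spec_normal_indices_generator shape order (normal_indices_generator shape order)

-- ===== LEMMAS AND PROOFS =====

/-- The C-order index table of a shape (first axis slowest). -/
def genC : List Int → List (List Int)
  | [] => [[]]
  | n :: rest => (PySem.List.pyRange 0 n 1).flatMap (fun i => (genC rest).map (fun t => i :: t))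

lemma foldr_genC (sh : List Int) :
    sh.foldr (fun n out => (PySem.List.pyRange 0 n 1).flatMap (fun i => out.map (fun t => i :: t))) [[]]
      = genC sh := by
  induction sh with
  | nil => rfl
  | cons n rest ih => simp [genC, ih]

lemma alt_fold (sh : List Int) :
    sh.reverse.foldl
        (fun out n => (PySem.List.pyRange 0 n 1).flatMap (fun i => out.map (fun t => i :: t)))
        [[]]
      = genC sh := by
  rw [← List.foldr_eq_foldl_reverse, foldr_genC]

/-- Generic invariant lemma for the accumulating folds inside `pyRecursive`. -/
lemma foldStep {n : Nat} (I : List Int → Prop) (F : List Int → Int → List Int × List (List Int))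
    (G : Int → List (List Int))
    (hF : ∀ ind i, ind.length = n → I ind →
      (F ind i).1.length = n ∧ I (F ind i).1 ∧ (F ind i).2 = G i) :
    ∀ (l : List Int) (ind : List Int) (acc : List (List Int)), ind.length = n → I ind →
      (l.foldl (fun st i => ((F st.1 i).1, st.2 ++ (F st.1 i).2)) (ind, acc)).2
          = acc ++ l.flatMap G
        ∧ (l.foldl (fun st i => ((F st.1 i).1, st.2 ++ (F st.1 i).2)) (ind, acc)).1.length = n
        ∧ I (l.foldl (fun st i => ((F st.1 i).1, st.2 ++ (F st.1 i).2)) (ind, acc)).1 := by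
  intro l
  induction l with
  | nil => intro ind acc h1 h2; exact ⟨by simp, h1, h2⟩
  | cons x xs ih =>
    intro ind acc h1 h2
    obtain ⟨hl, hi, hg⟩ := hF ind x h1 h2
    obtain ⟨e1, e2, e3⟩ := ih (F ind x).1 (acc ++ (F ind x).2) hl hi
    refine ⟨?_, e2, e3⟩
    simp only [List.foldl_cons] at e1 ⊢
    rw [e1, hg]
    simp [List.flatMap_cons]

-- C order: at axis k with the first k buffer slots holding P, the yields are
-- genC (shape.drop k) each prefixed by P, and the buffer keeps its first k slots.
lemma recC (shape : List Int) (n : Nat) (hn : shape.length = n) :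
    ∀ (fuel k : Nat) (indices : List Int), k < n → n - k = fuel → indices.length = n →
      (pyRecursive fuel indices (k : Int) ((n : Int) - 1) 1 shape).2
          = (genC (shape.drop k)).map (fun t => indices.take k ++ t)
        ∧ (pyRecursive fuel indices (k : Int) ((n : Int) - 1) 1 shape).1.take k = indices.take k
        ∧ (pyRecursive fuel indices (k : Int) ((n : Int) - 1) 1 shape).1.length = n := by
  intro fuel
  induction fuel with
  | zero => intro k indices hk hfuel hlen; omega
  | succ fuel ih =>
    intro k indices hk hfuel hlen
    have hkn : k < shape.length := by omega
    have hget : (PySem.List.pyGet? shape (k : Int)).getD 0 = shape[k] := by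
      rw [PySem.List.pyGet?_natCast]
      simp [List.getElem?_eq_getElem hkn]
    by_cases hke : k = n - 1
    · -- innermost axis: b = e
      have hbe : ((k : Nat) : Int) = (n : Int) - 1 := by omega
      have hdrop1 : shape.drop (k + 1) = [] := List.drop_eq_nil_of_le (by omega)
      have hF : ∀ (ind : List Int) (i : Int), ind.length = n → ind.take k = indices.take k →
          (pySetAt ind (k : Int) i, [pySetAt ind (k : Int) i]).1.length = n ∧
          (pySetAt ind (k : Int) i, [pySetAt ind (k : Int) i]).1.take k = indices.take k ∧
          (pySetAt ind (k : Int) i, [pySetAt ind (k : Int) i]).2 = [indices.take k ++ [i]] := by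
        intro ind i hil hit
        have hset : ind.set k i = ind.take k ++ i :: ind.drop (k + 1) :=
          List.set_eq_take_cons_drop i (by omega)
        have hd : ind.drop (k + 1) = [] := List.drop_eq_nil_of_le (by omega)
        refine ⟨by simp [pySetAt, hil], ?_, ?_⟩
        · simp only [pySetAt, Int.toNat_natCast, hset, hd, hit]
          exact List.take_left' (by simp; omega)
        · simp [pySetAt, hset, hd, hit]
      have H := foldStep (n := n) (fun ind => ind.take k = indices.take k)
        (fun ind i => (pySetAt ind (k : Int) i, [pySetAt ind (k : Int) i]))
        (fun i => [indices.take k ++ [i]]) hF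
        (PySem.List.pyRange 0 shape[k] 1) indices [] hlen rfl
      simp only [pyRecursive, if_pos hbe, hget]
      refine ⟨H.1.trans ?_, H.2.2, H.2.1⟩
      rw [List.drop_eq_getElem_cons hkn, hdrop1]
      simp [genC, List.map_flatMap]
    · -- b ≠ e: recurse on axis k+1
      have hbe : ¬ (((k : Nat) : Int) = (n : Int) - 1) := by omega
      have hcast : ((k : Int) + 1) = (((k + 1 : Nat)) : Int) := by push_cast; ring
      have hF : ∀ (ind : List Int) (i : Int), ind.length = n → ind.take k = indices.take k →
          (pyRecursive fuel (pySetAt ind (k : Int) i) (((k + 1 : Nat)) : Int) ((n : Int) - 1) 1 shape).1.length = n ∧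
          (pyRecursive fuel (pySetAt ind (k : Int) i) (((k + 1 : Nat)) : Int) ((n : Int) - 1) 1 shape).1.take k = indices.take k ∧
          (pyRecursive fuel (pySetAt ind (k : Int) i) (((k + 1 : Nat)) : Int) ((n : Int) - 1) 1 shape).2
            = (genC (shape.drop (k + 1))).map (fun t => (indices.take k ++ [i]) ++ t) := by
        intro ind i hil hit
        have hlset : (pySetAt ind (k : Int) i).length = n := by simp [pySetAt, hil]
        have hset : ind.set k i = ind.take k ++ i :: ind.drop (k + 1) :=
          List.set_eq_take_cons_drop i (by omega)
        have htk : (ind.take k).length = k := by simp; omega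
        have htake1 : (pySetAt ind (k : Int) i).take (k + 1) = indices.take k ++ [i] := by
          simp only [pySetAt, Int.toNat_natCast, hset]
          rw [show ind.take k ++ i :: ind.drop (k + 1) = (ind.take k ++ [i]) ++ ind.drop (k + 1) by simp]
          rw [List.take_left' (by simp; omega), hit]
        obtain ⟨e1, e2, e3⟩ := ih (k + 1) (pySetAt ind (k : Int) i) (by omega) (by omega) hlset
        refine ⟨e3, ?_, ?_⟩
        · have : (pyRecursive fuel (pySetAt ind (k : Int) i) (((k + 1 : Nat)) : Int) ((n : Int) - 1) 1 shape).1.take k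
              = ((pyRecursive fuel (pySetAt ind (k : Int) i) (((k + 1 : Nat)) : Int) ((n : Int) - 1) 1 shape).1.take (k + 1)).take k := by
            rw [List.take_take]; congr 1; omega
          rw [this, e2, htake1]
          exact List.take_left' (by simp; omega)
        · rw [e1, htake1]
      have H := foldStep (n := n) (fun ind => ind.take k = indices.take k)
        (fun ind i => ((pyRecursive fuel (pySetAt ind (k : Int) i) (((k + 1 : Nat)) : Int) ((n : Int) - 1) 1 shape).1,
                       (pyRecursive fuel (pySetAt ind (k : Int) i) (((k + 1 : Nat)) : Int) ((n : Int) - 1) 1 shape).2))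
        (fun i => (genC (shape.drop (k + 1))).map (fun t => (indices.take k ++ [i]) ++ t)) hF
        (PySem.List.pyRange 0 shape[k] 1) indices [] hlen rfl
      simp only [pyRecursive, if_neg hbe, hget, hcast]
      refine ⟨H.1.trans ?_, H.2.2, H.2.1⟩
      have hfun : (fun i : Int => List.map (fun t => List.take k indices ++ [i] ++ t) (genC (List.drop (k + 1) shape)))
          = (fun i : Int => List.map ((fun t => List.take k indices ++ t) ∘ fun t => i :: t) (genC (List.drop (k + 1) shape))) := by
        funext i
        apply List.map_congr_left
        intro t _
        simp
      rw [List.drop_eq_getElem_cons hkn]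
      simp only [genC, List.map_flatMap, List.map_map, List.nil_append, hfun]

lemma recF (shape : List Int) (n : Nat) (hn : shape.length = n) :
    ∀ (k : Nat) (indices : List Int), k < n → indices.length = n →
      (pyRecursive (k + 1) indices (k : Int) 0 (-1) shape).2
          = (genC ((shape.take (k + 1)).reverse)).map (fun t => t.reverse ++ indices.drop (k + 1))
        ∧ (pyRecursive (k + 1) indices (k : Int) 0 (-1) shape).1.drop (k + 1) = indices.drop (k + 1)
        ∧ (pyRecursive (k + 1) indices (k : Int) 0 (-1) shape).1.length = n := by
  intro k
  induction k with
  | zero =>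
    intro indices hk hlen
    have h0 : 0 < shape.length := by omega
    have hget : (PySem.List.pyGet? shape (0 : Int)).getD 0 = shape[0] := by
      rw [show ((0 : Int)) = ((0 : Nat) : Int) from rfl, PySem.List.pyGet?_natCast]
      simp [List.getElem?_eq_getElem h0]
    have htk1 : (shape.take 1).reverse = [shape[0]] := by
      rw [List.take_one]
      simp [List.head?_eq_getElem?, List.getElem?_eq_getElem h0]
    have hF : ∀ (ind : List Int) (i : Int), ind.length = n → ind.drop 1 = indices.drop 1 →
        (pySetAt ind (0 : Int) i, [pySetAt ind (0 : Int) i]).1.length = n ∧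
        (pySetAt ind (0 : Int) i, [pySetAt ind (0 : Int) i]).1.drop 1 = indices.drop 1 ∧
        (pySetAt ind (0 : Int) i, [pySetAt ind (0 : Int) i]).2 = [i :: indices.drop 1] := by
      intro ind i hil hid
      have hset : ind.set 0 i = ind.take 0 ++ i :: ind.drop 1 := List.set_eq_take_cons_drop i (by omega)
      refine ⟨by simp [pySetAt, hil], ?_, ?_⟩
      · simp [pySetAt, hset, hid]
      · simp [pySetAt, hset, hid]
    have H := foldStep (n := n) (fun ind => ind.drop 1 = indices.drop 1)
      (fun ind i => (pySetAt ind (0 : Int) i, [pySetAt ind (0 : Int) i]))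
      (fun i => [i :: indices.drop 1]) hF
      (PySem.List.pyRange 0 shape[0] 1) indices [] hlen rfl
    simp only [pyRecursive, Nat.cast_zero, hget]
    refine ⟨H.1.trans ?_, H.2.2, H.2.1⟩
    rw [htk1]
    simp [genC, List.map_flatMap]
  | succ k ih =>
    intro indices hk hlen
    have hkn : k + 1 < shape.length := by omega
    have hbe : ¬ ((((k + 1 : Nat)) : Int) = 0) := by omega
    have hget : (PySem.List.pyGet? shape ((k + 1 : Nat) : Int)).getD 0 = shape[k + 1] := by
      rw [PySem.List.pyGet?_natCast]
      simp [List.getElem?_eq_getElem hkn]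
    have hcast : (((k + 1 : Nat) : Int) + -1) = ((k : Nat) : Int) := by push_cast; ring
    have htk : (shape.take (k + 2)).reverse = shape[k + 1] :: (shape.take (k + 1)).reverse := by
      rw [List.take_add_one, List.getElem?_eq_getElem hkn]
      simp
    have hF : ∀ (ind : List Int) (i : Int), ind.length = n → ind.drop (k + 2) = indices.drop (k + 2) →
        (pyRecursive (k + 1) (pySetAt ind ((k + 1 : Nat) : Int) i) ((k : Nat) : Int) 0 (-1) shape).1.length = n ∧
        (pyRecursive (k + 1) (pySetAt ind ((k + 1 : Nat) : Int) i) ((k : Nat) : Int) 0 (-1) shape).1.drop (k + 2) = indices.drop (k + 2) ∧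
        (pyRecursive (k + 1) (pySetAt ind ((k + 1 : Nat) : Int) i) ((k : Nat) : Int) 0 (-1) shape).2
          = (genC ((shape.take (k + 1)).reverse)).map (fun t => t.reverse ++ i :: indices.drop (k + 2)) := by
      intro ind i hil hid
      have hlset : (pySetAt ind ((k + 1 : Nat) : Int) i).length = n := by simp [pySetAt, hil]
      have hset : ind.set (k + 1) i = ind.take (k + 1) ++ i :: ind.drop (k + 2) :=
        List.set_eq_take_cons_drop i (by omega)
      have hdropset : (pySetAt ind ((k + 1 : Nat) : Int) i).drop (k + 1) = i :: indices.drop (k + 2) := by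
        simp only [pySetAt, Int.toNat_natCast, hset]
        rw [List.drop_left' (by simp; omega), hid]
      obtain ⟨e1, e2, e3⟩ := ih (pySetAt ind ((k + 1 : Nat) : Int) i) (by omega) hlset
      refine ⟨e3, ?_, ?_⟩
      · have : (pyRecursive (k + 1) (pySetAt ind ((k + 1 : Nat) : Int) i) ((k : Nat) : Int) 0 (-1) shape).1.drop (k + 2)
            = ((pyRecursive (k + 1) (pySetAt ind ((k + 1 : Nat) : Int) i) ((k : Nat) : Int) 0 (-1) shape).1.drop (k + 1)).drop 1 := by
          rw [List.drop_drop]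
        rw [this, e2, hdropset]
        simp
      · rw [e1, hdropset]
    have H := foldStep (n := n) (fun ind => ind.drop (k + 2) = indices.drop (k + 2))
      (fun ind i => ((pyRecursive (k + 1) (pySetAt ind ((k + 1 : Nat) : Int) i) ((k : Nat) : Int) 0 (-1) shape).1,
                     (pyRecursive (k + 1) (pySetAt ind ((k + 1 : Nat) : Int) i) ((k : Nat) : Int) 0 (-1) shape).2))
      (fun i => (genC ((shape.take (k + 1)).reverse)).map (fun t => t.reverse ++ i :: indices.drop (k + 2))) hF
      (PySem.List.pyRange 0 shape[k + 1] 1) indices [] hlen rfl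
    simp only [pyRecursive, if_neg hbe, hget, hcast]
    refine ⟨H.1.trans ?_, H.2.2, H.2.1⟩
    have hfun : (fun i : Int => List.map (fun t => t.reverse ++ i :: List.drop (k + 2) indices) (genC (List.take (k + 1) shape).reverse))
        = (fun i : Int => List.map ((fun t => t.reverse ++ List.drop (k + 1 + 1) indices) ∘ fun t => i :: t) (genC (List.take (k + 1) shape).reverse)) := by
      funext i
      apply List.map_congr_left
      intro t _
      simp
    rw [htk]
    simp only [genC, List.map_flatMap, List.map_map, List.nil_append, hfun]

-- port/spec bridging lemmas
lemma portA_C (shape : List Int) (h : 0 < shape.length) :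
    normal_indices_generator shape "C" = genC shape := by
  unfold normal_indices_generator
  rw [if_pos ⟨h, Or.inl rfl⟩, if_pos rfl]
  have H := (recC shape shape.length rfl shape.length 0 (List.replicate shape.length 0)
    h (by omega) (by simp)).1
  simpa using H

lemma portB_C (shape : List Int) (h : 0 < shape.length) :
    normal_indices_generator_alt shape "C" = genC shape := by
  unfold normal_indices_generator_alt
  rw [if_pos ⟨h, Or.inl rfl⟩]
  simp only [alt_fold]
  simp

lemma portA_F (shape : List Int) (h : 0 < shape.length) :
    normal_indices_generator shape "F" = (genC shape.reverse).map List.reverse := by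
  unfold normal_indices_generator
  rw [if_pos ⟨h, Or.inr rfl⟩, if_neg (by decide : ¬ (("F" : String) = "C"))]
  obtain ⟨m, hm⟩ : ∃ m, shape.length = m + 1 := ⟨shape.length - 1, by omega⟩
  have H := (recF shape shape.length rfl m (List.replicate shape.length 0)
    (by omega) (by simp)).1
  rw [hm] at H ⊢
  rw [show (((m + 1 : Nat)) : Int) - 1 = ((m : Nat) : Int) by push_cast; ring]
  rw [H, List.take_of_length_le (by omega)]
  simp

lemma portB_F (shape : List Int) (h : 0 < shape.length) :
    normal_indices_generator_alt shape "F" = (genC shape.reverse).map List.reverse := by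
  unfold normal_indices_generator_alt
  rw [if_pos ⟨h, Or.inr rfl⟩]
  simp only [if_neg (by decide : ¬ (("F" : String) = "C")), alt_fold]

-- ===== VERDICT (by name: the statement is the Claim_ definition above) =====
theorem normal_indices_generator_spec : Claim_equal_normal_indices_generator := by
  intro shape order _ hpre
  unfold Spec_normal_indices_generator
  obtain ⟨hlen, horder⟩ := hpre
  rcases horder with hC | hF
  · subst hC; rw [portA_C shape hlen, portB_C shape hlen]
  · subst hF; rw [portA_F shape hlen, portB_F shape hlen]
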